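-- pv_equiv track=rewrite | github.com/difer19/Estructuras-de-Datos | GrafosA_Star.py | calcularFuncionHeuristicaTorre
-- ===== SOURCE A (Python) =====
-- def calcularFuncionHeuristicaTorre(torre, idTorre):
--     iteracion = 0
--     aux_disco = 0
--     valor_heuristico_torre = 0
--     if len(torre) > 0:
--         for disco in torre:
--             if iteracion == 0:
--                 aux_disco = disco
--                 iteracion += 1
--             elif aux_disco < disco:
--                 if idTorre == "A": valor_heuristico_torre += 1
--                 if idTorre == "B": valor_heuristico_torre += 15
--                 if idTorre == "C": valor_heuristico_torre += 10
--                 aux_disco = disco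
--             elif aux_disco > disco:
--                 valor_heuristico_torre -= 1000
--
--         if idTorre == "A": valor_heuristico_torre += 1
--         if idTorre == "B": valor_heuristico_torre += 15
--         if idTorre == "C": valor_heuristico_torre += 10
--
--     return valor_heuristico_torre
-- ===== SOURCE B (Python) =====
-- def calcularFuncionHeuristicaTorre(torre, idTorre):
--     if not torre:
--         return 0
--     peso = {"A": 1, "B": 15, "C": 10}.get(idTorre, 0)
--     prefix = []
--     m = None
--     for d in torre:
--         m = d if (m is None or d > m) else m
--         prefix.append(m)
--     nuevos = sum(1 for d, p in zip(torre[1:], prefix) if d > p)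
--     bajos = sum(1 for d, p in zip(torre[1:], prefix) if d < p)
--     return peso * (nuevos + 1) - 1000 * bajos
-- ===== Notes on version B (the rewrite author's own statement) =====
-- stated objective: alternative
-- what changed: Replaces A's single stateful loop (running aux/iteration/accumulator with inline weight branches) by a prefix-maximum table plus two independent counting passes over zip(torre[1:], prefix) combined in one closed-form expression peso*(nuevos+1) - 1000*bajos.
import Mathlib
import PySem

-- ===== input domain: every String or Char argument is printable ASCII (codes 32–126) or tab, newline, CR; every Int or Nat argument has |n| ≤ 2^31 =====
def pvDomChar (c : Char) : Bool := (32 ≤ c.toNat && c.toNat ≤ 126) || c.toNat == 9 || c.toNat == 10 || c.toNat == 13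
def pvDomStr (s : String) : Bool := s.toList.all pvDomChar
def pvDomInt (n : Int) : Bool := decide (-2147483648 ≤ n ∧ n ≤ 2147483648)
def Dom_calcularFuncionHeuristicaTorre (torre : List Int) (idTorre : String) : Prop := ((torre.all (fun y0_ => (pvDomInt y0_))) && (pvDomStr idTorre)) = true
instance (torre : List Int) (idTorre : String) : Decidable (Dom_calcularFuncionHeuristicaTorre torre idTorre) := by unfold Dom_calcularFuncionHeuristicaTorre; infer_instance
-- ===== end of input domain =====

-- B replaces A's single stateful loop by a prefix-maximum table plus two counting
-- passes combined in a closed-form expression (objective: alternative; same cost).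

-- ===== PORT A =====
-- the body of A's for-loop, state = (iteracion, aux_disco, valor_heuristico_torre)
def pvStepA (idTorre : String) (st : Nat × Int × Int) (disco : Int) : Nat × Int × Int :=
  let (iteracion, aux_disco, valor) := st
  if iteracion == 0 then
    (iteracion + 1, disco, valor)
  else if aux_disco < disco then
    let valor := if idTorre == "A" then valor + 1 else valor
    let valor := if idTorre == "B" then valor + 15 else valor
    let valor := if idTorre == "C" then valor + 10 else valor
    (iteracion, disco, valor)
  else if aux_disco > disco then
    (iteracion, aux_disco, valor - 1000)
  else
    (iteracion, aux_disco, valor)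

def calcularFuncionHeuristicaTorre (torre : List Int) (idTorre : String) : Int :=
  if torre.length > 0 then
    let st := torre.foldl (pvStepA idTorre) (0, 0, 0)
    let valor := st.2.2
    let valor := if idTorre == "A" then valor + 1 else valor
    let valor := if idTorre == "B" then valor + 15 else valor
    let valor := if idTorre == "C" then valor + 10 else valor
    valor
  else 0

-- ===== PORT B =====
-- B's prefix-maximum loop (m starts as None, prefix collects the running maximum)
def pvPrefixMax : Option Int → List Int → List Int
  | _, [] => []
  | none, d :: rest => d :: pvPrefixMax (some d) rest
  | some m, d :: rest =>
      let m' := if d > m then d else m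
      m' :: pvPrefixMax (some m') rest

def calcularFuncionHeuristicaTorre_alt (torre : List Int) (idTorre : String) : Int :=
  match torre with
  | [] => 0
  | _ :: _ =>
    -- {"A": 1, "B": 15, "C": 10}.get(idTorre, 0)
    let peso : Int := if idTorre == "A" then 1 else if idTorre == "B" then 15
                      else if idTorre == "C" then 10 else 0
    let pref := pvPrefixMax none torre
    let nuevos : Int := ((torre.drop 1).zip pref).countP (fun p => decide (p.2 < p.1))
    let bajos : Int := ((torre.drop 1).zip pref).countP (fun p => decide (p.1 < p.2))
    peso * (nuevos + 1) - 1000 * bajos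

-- ===== PRECONDITION & SPEC =====
def Spec_calcularFuncionHeuristicaTorre (torre : List Int) (idTorre : String) (out : Int) : Prop := out = calcularFuncionHeuristicaTorre_alt torre idTorre
instance (torre : List Int) (idTorre : String) (out : Int) : Decidable (Spec_calcularFuncionHeuristicaTorre torre idTorre out) := by unfold Spec_calcularFuncionHeuristicaTorre; infer_instance

-- ===== CLAIM (what is proved, stated in full; the proofs are below) =====
def Claim_equal_calcularFuncionHeuristicaTorre : Prop := ∀ (torre : List Int) (idTorre : String), Dom_calcularFuncionHeuristicaTorre torre idTorre → Spec_calcularFuncionHeuristicaTorre torre idTorre (calcularFuncionHeuristicaTorre torre idTorre)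

-- ===== LEMMAS AND PROOFS =====

-- A's three sequential if-additions equal B's weight
def pvPeso (idTorre : String) : Int :=
  if idTorre == "A" then 1 else if idTorre == "B" then 15
  else if idTorre == "C" then 10 else 0

lemma pvPeso_add (idTorre : String) (v : Int) :
    (if idTorre = "C" then
        (if idTorre = "B" then (if idTorre = "A" then v + 1 else v) + 15
         else if idTorre = "A" then v + 1 else v) + 10
      else if idTorre = "B" then (if idTorre = "A" then v + 1 else v) + 15
      else if idTorre = "A" then v + 1 else v) = v + pvPeso idTorre := by
  unfold pvPeso
  split_ifs <;> simp_all

-- main loop invariant: after the first element, aux is the running maximum m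
lemma pvLoop (idTorre : String) :
    ∀ (t : List Int) (m v : Int),
      (List.foldl (pvStepA idTorre) (1, m, v) t).2.2 =
        v + pvPeso idTorre * ((t.zip (m :: pvPrefixMax (some m) t)).countP (fun p => decide (p.2 < p.1)) : Int)
          - 1000 * ((t.zip (m :: pvPrefixMax (some m) t)).countP (fun p => decide (p.1 < p.2)) : Int) := by
  intro t
  induction t with
  | nil => intro m v; simp
  | cons d ds ih =>
    intro m v
    rcases lt_trichotomy m d with h | h | h
    · have hstep : pvStepA idTorre (1, m, v) d = (1, d, v + pvPeso idTorre) := by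
        simp [pvStepA, h, pvPeso_add]
      have hpre : pvPrefixMax (some m) (d :: ds) = d :: pvPrefixMax (some d) ds := by
        simp [pvPrefixMax, h]
      rw [List.foldl_cons, hstep, ih, hpre]
      simp [h, not_lt.mpr (le_of_lt h)]
      ring
    · subst h
      have hstep : pvStepA idTorre (1, m, v) m = (1, m, v) := by
        simp [pvStepA]
      have hpre : pvPrefixMax (some m) (m :: ds) = m :: pvPrefixMax (some m) ds := by
        simp [pvPrefixMax]
      rw [List.foldl_cons, hstep, ih, hpre]
      simp
    · have hstep : pvStepA idTorre (1, m, v) d = (1, m, v - 1000) := by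
        simp [pvStepA, h, not_lt.mpr (le_of_lt h)]
      have hpre : pvPrefixMax (some m) (d :: ds) = m :: pvPrefixMax (some m) ds := by
        simp [pvPrefixMax, not_lt.mpr (le_of_lt h)]
      rw [List.foldl_cons, hstep, ih, hpre]
      simp [h, not_lt.mpr (le_of_lt h)]
      ring

-- ===== VERDICT (by name: the statement is the Claim_ definition above) =====
theorem calcularFuncionHeuristicaTorre_spec : Claim_equal_calcularFuncionHeuristicaTorre := by
  intro torre idTorre _
  unfold Spec_calcularFuncionHeuristicaTorre
  cases torre with
  | nil => simp [calcularFuncionHeuristicaTorre, calcularFuncionHeuristicaTorre_alt]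
  | cons h t =>
    have hfirst : pvStepA idTorre (0, 0, 0) h = (1, h, 0) := by
      simp [pvStepA]
    have hpre : pvPrefixMax none (h :: t) = h :: pvPrefixMax (some h) t := rfl
    simp only [calcularFuncionHeuristicaTorre, calcularFuncionHeuristicaTorre_alt,
      List.length_cons, List.foldl_cons, hfirst, gt_iff_lt, Nat.zero_lt_succ, if_true,
      hpre, List.drop_one, List.tail_cons, beq_iff_eq]
    rw [pvLoop idTorre t h 0, pvPeso_add]
    simp only [pvPeso]
    split_ifs <;> simp_all <;> ring
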